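-- pv_equiv track=rewrite | github.com/Nik4ant/QT_project | ui/login_form.py | check_form_field
-- ===== SOURCE A (Python) =====
-- def check_form_field(field_value: str) -> bool:
--     """
--     Method checks value of form field, for example login or password
--
--     :param field_value: Value of the field to check (login or password)
--     :return: True if value correct False if not
--     """
--
--     # This much easier than filtering all
--     # forbidden characters with str.isalnum() method
--     ALLOWED_SYMBOLS = {
--         'a', 'b', 'c', 'd', 'e', 'f', 'g', 'h', 'i', 'j', 'k', 'l', 'm',
--         'n', 'o', 'p', 'q', 'r', 's', 't', 'u', 'v', 'w', 'x', 'y', 'z',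
--         '_', '0', '1', '2', '3', '4', '5', '6', '7', '8', '9'
--     }
--     for char in field_value.lower():
--         if char not in ALLOWED_SYMBOLS:
--             return False
--     return len(field_value) != 0
-- ===== SOURCE B (Python) =====
-- _ALLOWED = "abcdefghijklmnopqrstuvwxyz_0123456789"
--
--
-- def check_form_field(field_value: str) -> bool:
--     """
--     Method checks value of form field, for example login or password
--
--     :param field_value: Value of the field to check (login or password)
--     :return: True if value correct False if not
--     """
--     # Non-empty, and stripping every allowed character from both ends of the
--     # lowered string leaves nothing: any forbidden character would survive.
--     return field_value != "" and field_value.lower().strip(_ALLOWED) == ""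
-- ===== Notes on version B (the rewrite author's own statement) =====
-- stated objective: faster
-- what changed: Replaces the per-character early-return membership loop with a loop-free formulation: strip all allowed characters from both ends of the lowered string with str.strip(ALLOWED) and test the result empty (any forbidden character survives the strip), plus a non-empty check.
import Mathlib
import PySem

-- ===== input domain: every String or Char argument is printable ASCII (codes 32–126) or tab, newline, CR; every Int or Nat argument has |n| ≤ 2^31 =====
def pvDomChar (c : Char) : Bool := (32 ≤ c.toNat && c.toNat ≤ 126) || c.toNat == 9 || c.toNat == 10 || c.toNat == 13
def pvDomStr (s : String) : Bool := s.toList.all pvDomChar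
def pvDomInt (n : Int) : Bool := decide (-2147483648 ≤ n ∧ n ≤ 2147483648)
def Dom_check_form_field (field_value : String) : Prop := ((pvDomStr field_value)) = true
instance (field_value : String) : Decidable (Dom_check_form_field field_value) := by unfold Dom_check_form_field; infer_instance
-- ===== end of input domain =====

-- B replaces A's per-character early-return membership loop by a loop-free test:
-- strip all allowed characters from both ends of the lowered string and require
-- the result empty (plus non-emptiness); same values on every input.

-- ===== PORT A =====
def pvAllowedSet : PySem.Set Char := PySem.Set.ofList
  ['a', 'b', 'c', 'd', 'e', 'f', 'g', 'h', 'i', 'j', 'k', 'l', 'm',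
   'n', 'o', 'p', 'q', 'r', 's', 't', 'u', 'v', 'w', 'x', 'y', 'z',
   '_', '0', '1', '2', '3', '4', '5', '6', '7', '8', '9']

-- the 'for char in field_value.lower(): if char not in ALLOWED_SYMBOLS: return False' loop,
-- falling through to 'return len(field_value) != 0'
def pvLoopA (field_value : String) : List Char → Bool
  | [] => PySem.Str.len field_value != 0
  | c :: rest =>
      if !(PySem.Set.contains pvAllowedSet c) then false
      else pvLoopA field_value rest

def check_form_field (field_value : String) : Bool :=
  pvLoopA field_value (PySem.Chars.lower field_value.toList)

-- ===== PORT B =====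
def pvAllowedStr : List Char := "abcdefghijklmnopqrstuvwxyz_0123456789".toList

-- field_value != "" and field_value.lower().strip(_ALLOWED) == ""
def check_form_field_alt (field_value : String) : Bool :=
  field_value != "" &&
    PySem.Chars.stripChars (PySem.Chars.lower field_value.toList) pvAllowedStr == []

-- ===== PRECONDITION & SPEC =====
def Spec_check_form_field (field_value : String) (out : Bool) : Prop :=
  out = check_form_field_alt field_value
instance (field_value : String) (out : Bool) : Decidable (Spec_check_form_field field_value out) := by
  unfold Spec_check_form_field; infer_instance

-- ===== CLAIM =====
def Claim_equal_check_form_field : Prop :=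
  ∀ (field_value : String), Dom_check_form_field field_value →
    Spec_check_form_field field_value (check_form_field field_value)

-- ===== LEMMAS AND PROOFS =====
-- A's loop is: every char in the allowed set, and the string non-empty.
theorem pvLoopA_eq (fv : String) (l : List Char) :
    pvLoopA fv l = (l.all (fun c => PySem.Set.contains pvAllowedSet c) && (PySem.Str.len fv != 0)) := by
  induction l with
  | nil => simp [pvLoopA]
  | cons c rest ih =>
      simp only [pvLoopA, List.all_cons]
      cases hc : PySem.Set.contains pvAllowedSet c <;> simp [ih]


-- the two membership tests agree (the set's element list is exactly pvAllowedStr)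
theorem pvMem_eq (c : Char) :
    PySem.Set.contains pvAllowedSet c = pvAllowedStr.contains c := by
  have h : pvAllowedSet = pvAllowedStr := by decide
  rw [h]; rfl

-- dropping p-satisfying elements leaves survivors that are all-p only when []
theorem pvAll_dropWhile {α : Type} (p : α → Bool) (l : List α) :
    (l.dropWhile p).all p = (l.dropWhile p).isEmpty := by
  induction l with
  | nil => simp
  | cons a t ih =>
      by_cases h : p a = true
      · simpa [List.dropWhile_cons, h] using ih
      · simp [h]

-- stripping p-chars from both ends leaves [] iff every element satisfies p
theorem pvStrip_empty {α : Type} (p : α → Bool) (l : List α) :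
    ((List.dropWhile p (List.dropWhile p l).reverse).reverse = []) ↔ l.all p = true := by
  constructor
  · intro h
    have h1 : List.dropWhile p (List.dropWhile p l).reverse = [] := by
      simpa using congrArg List.reverse h
    have h2 : ∀ x ∈ (List.dropWhile p l).reverse, p x = true :=
      List.dropWhile_eq_nil_iff.mp h1
    have h3 : (List.dropWhile p l).all p = true := by
      rw [List.all_eq_true]; intro x hx
      exact h2 x (List.mem_reverse.mpr hx)
    have h4 : List.dropWhile p l = [] := by
      have := pvAll_dropWhile p l
      rw [h3] at this
      exact List.isEmpty_iff.mp this.symm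
    rw [List.all_eq_true]
    exact List.dropWhile_eq_nil_iff.mp h4
  · intro h
    have : List.dropWhile p l = [] :=
      List.dropWhile_eq_nil_iff.mpr (List.all_eq_true.mp h)
    simp [this]

-- ===== VERDICT =====
theorem check_form_field_spec : Claim_equal_check_form_field := by
  intro fv _
  unfold Spec_check_form_field check_form_field check_form_field_alt
  rw [pvLoopA_eq]
  have hmem : (PySem.Chars.lower fv.toList).all (fun c => PySem.Set.contains pvAllowedSet c)
      = (PySem.Chars.lower fv.toList).all (fun c => pvAllowedStr.contains c) := by
    have hf : (fun c => PySem.Set.contains pvAllowedSet c) = (fun c => pvAllowedStr.contains c) :=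
      funext pvMem_eq
    rw [hf]
  rw [hmem]
  have hstrip : (PySem.Chars.stripChars (PySem.Chars.lower fv.toList) pvAllowedStr == [])
      = (PySem.Chars.lower fv.toList).all (fun c => pvAllowedStr.contains c) := by
    simp only [PySem.Chars.stripChars]
    cases hall : (PySem.Chars.lower fv.toList).all (fun c => pvAllowedStr.contains c) with
    | true =>
        rw [(pvStrip_empty (fun c => pvAllowedStr.contains c)
          (PySem.Chars.lower fv.toList)).mpr hall]
        rfl
    | false =>
        rw [beq_eq_false_iff_ne]
        intro hcon
        exact Bool.false_ne_true (hall ▸ (pvStrip_empty _ _).mp hcon)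
  rw [hstrip]
  have hne : (fv != "") = (PySem.Str.len fv != 0) := by
    simp [bne]
  rw [hne, Bool.and_comm]
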